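-- pv_equiv track=rewrite | github.com/Constellab/gws_omix | src/gws_omix/biomath_cacul/gc_content_calculator/_gc_content_calculator.py | rolling_counts
-- ===== SOURCE A (Python) =====
-- from typing import List, Tuple, Dict
--
-- def rolling_counts(seq: str, win: int) -> Tuple[List[int], List[int], List[int], List[int]]:
--     """Return arrays (A, C, G, T_or_U) counts in each window."""
--     n = len(seq)
--     if n < win:
--         s = seq
--         return [s.count("A")], [s.count("C")], [s.count("G")], [s.count("T") + s.count("U")]
--     A = [0]*(n - win + 1)
--     C = [0]*(n - win + 1)
--     G = [0]*(n - win + 1)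
--     TU = [0]*(n - win + 1)
--
--     w = seq[:win]
--     A0 = w.count("A"); C0 = w.count("C"); G0 = w.count("G"); TU0 = w.count("T") + w.count("U")
--     A[0] = A0; C[0] = C0; G[0] = G0; TU[0] = TU0
--
--     for i in range(1, n - win + 1):
--         out = seq[i-1]
--         inn = seq[i+win-1]
--         if out == "A": A0 -= 1
--         elif out == "C": C0 -= 1
--         elif out == "G": G0 -= 1
--         elif out in ("T","U"): TU0 -= 1
--         if inn == "A": A0 += 1
--         elif inn == "C": C0 += 1
--         elif inn == "G": G0 += 1
--         elif inn in ("T","U"): TU0 += 1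
--         A[i] = A0; C[i] = C0; G[i] = G0; TU[i] = TU0
--     return A, C, G, TU
-- ===== SOURCE B (Python) =====
-- def rolling_counts(seq, win):
--     """Return arrays (A, C, G, T_or_U) counts in each window."""
--     n = len(seq)
--     if n < win:
--         s = seq
--         return [s.count("A")], [s.count("C")], [s.count("G")], [s.count("T") + s.count("U")]
--     # prefix-count arrays: pa[k] = number of 'A' in seq[:k], etc.
--     a = c = g = t = 0
--     pa = [0]; pc = [0]; pg = [0]; pt = [0]
--     for ch in seq:
--         a += (ch == "A")
--         c += (ch == "C")
--         g += (ch == "G")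
--         t += (ch == "T" or ch == "U")
--         pa.append(a); pc.append(c); pg.append(g); pt.append(t)
--     A  = [pa[i + win] - pa[i] for i in range(n - win + 1)]
--     C  = [pc[i + win] - pc[i] for i in range(n - win + 1)]
--     G  = [pg[i + win] - pg[i] for i in range(n - win + 1)]
--     TU = [pt[i + win] - pt[i] for i in range(n - win + 1)]
--     return A, C, G, TU
-- ===== Notes on version B (the rewrite author's own statement) =====
-- stated objective: alternative
-- what changed: Replaces A's sliding-window with per-step increment/decrement of four live counters by four prefix-count arrays built in one pass, each window count then read off as a prefix difference pa[i+win]-pa[i]; the n<win guard is kept.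
import Mathlib
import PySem

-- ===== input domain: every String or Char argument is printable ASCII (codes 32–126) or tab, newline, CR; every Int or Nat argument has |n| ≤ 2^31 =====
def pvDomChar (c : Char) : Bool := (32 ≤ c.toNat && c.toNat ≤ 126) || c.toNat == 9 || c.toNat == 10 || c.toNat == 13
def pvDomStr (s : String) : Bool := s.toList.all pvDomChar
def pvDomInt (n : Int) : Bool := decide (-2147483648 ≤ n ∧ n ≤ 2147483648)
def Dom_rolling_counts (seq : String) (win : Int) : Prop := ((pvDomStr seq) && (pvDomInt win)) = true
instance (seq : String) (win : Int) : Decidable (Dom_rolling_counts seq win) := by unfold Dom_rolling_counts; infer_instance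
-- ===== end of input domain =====

-- B replaces A's incremental sliding-window counter updates by prefix-count arrays whose
-- differences give each window's count; same O(n) cost, a different decomposition.

-- ===== PORT A =====
-- shared helper: s.count("X") for a one-character pattern X is exactly the per-character count (exact port of str.count here)
def pvCnt (x : Char) (l : List Char) : Int := (l.countP (fun c => c == x) : Int)

-- A's loop body: slide the window by one (out = seq[i-1], inn = seq[i+win-1]) and append the counters
def pvStepA (l : List Char) (win : Int)
    (st : (Int × Int × Int × Int) × (List Int × List Int × List Int × List Int)) (i : Int) :
    (Int × Int × Int × Int) × (List Int × List Int × List Int × List Int) :=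
  let out := PySem.List.pyGetD l (i - 1) ' '
  let inn := PySem.List.pyGetD l (i + win - 1) ' '
  let s1 :=
    if out == 'A' then (st.1.1 - 1, st.1.2.1, st.1.2.2.1, st.1.2.2.2)
    else if out == 'C' then (st.1.1, st.1.2.1 - 1, st.1.2.2.1, st.1.2.2.2)
    else if out == 'G' then (st.1.1, st.1.2.1, st.1.2.2.1 - 1, st.1.2.2.2)
    else if out == 'T' || out == 'U' then (st.1.1, st.1.2.1, st.1.2.2.1, st.1.2.2.2 - 1)
    else st.1
  let s2 :=
    if inn == 'A' then (s1.1 + 1, s1.2.1, s1.2.2.1, s1.2.2.2)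
    else if inn == 'C' then (s1.1, s1.2.1 + 1, s1.2.2.1, s1.2.2.2)
    else if inn == 'G' then (s1.1, s1.2.1, s1.2.2.1 + 1, s1.2.2.2)
    else if inn == 'T' || inn == 'U' then (s1.1, s1.2.1, s1.2.2.1, s1.2.2.2 + 1)
    else s1
  (s2, (st.2.1 ++ [s2.1], st.2.2.1 ++ [s2.2.1], st.2.2.2.1 ++ [s2.2.2.1], st.2.2.2.2 ++ [s2.2.2.2]))

def rolling_counts (seq : String) (win : Int) : List Int × List Int × List Int × List Int :=
  let l := seq.toList
  let n : Int := PySem.Str.len seq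
  if n < win then
    ([pvCnt 'A' l], [pvCnt 'C' l], [pvCnt 'G' l], [pvCnt 'T' l + pvCnt 'U' l])
  else
    let w := PySem.List.slice l none (some win)
    let init := ((pvCnt 'A' w, pvCnt 'C' w, pvCnt 'G' w, pvCnt 'T' w + pvCnt 'U' w),
                 ([pvCnt 'A' w], [pvCnt 'C' w], [pvCnt 'G' w], [pvCnt 'T' w + pvCnt 'U' w]))
    let fin := (PySem.List.pyRange 1 (n - win + 1)).foldl (pvStepA l win) init
    fin.2

-- ===== PORT B =====
-- B's loop body: bump the four running totals for the current character and append them to the prefix arrays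
def pvStepB (st : (Int × Int × Int × Int) × (List Int × List Int × List Int × List Int)) (ch : Char) :
    (Int × Int × Int × Int) × (List Int × List Int × List Int × List Int) :=
  let a := st.1.1 + (if ch == 'A' then 1 else 0)
  let c := st.1.2.1 + (if ch == 'C' then 1 else 0)
  let g := st.1.2.2.1 + (if ch == 'G' then 1 else 0)
  let t := st.1.2.2.2 + (if ch == 'T' || ch == 'U' then 1 else 0)
  ((a, c, g, t), (st.2.1 ++ [a], st.2.2.1 ++ [c], st.2.2.2.1 ++ [g], st.2.2.2.2 ++ [t]))

def rolling_counts_alt (seq : String) (win : Int) : List Int × List Int × List Int × List Int :=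
  let l := seq.toList
  let n : Int := PySem.Str.len seq
  if n < win then
    ([pvCnt 'A' l], [pvCnt 'C' l], [pvCnt 'G' l], [pvCnt 'T' l + pvCnt 'U' l])
  else
    let p := (l.foldl pvStepB ((0, 0, 0, 0), ([0], [0], [0], [0]))).2
    let idxs := PySem.List.pyRange 0 (n - win + 1)
    (idxs.map (fun i => PySem.List.pyGetD p.1 (i + win) 0 - PySem.List.pyGetD p.1 i 0),
     idxs.map (fun i => PySem.List.pyGetD p.2.1 (i + win) 0 - PySem.List.pyGetD p.2.1 i 0),
     idxs.map (fun i => PySem.List.pyGetD p.2.2.1 (i + win) 0 - PySem.List.pyGetD p.2.2.1 i 0),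
     idxs.map (fun i => PySem.List.pyGetD p.2.2.2 (i + win) 0 - PySem.List.pyGetD p.2.2.2 i 0))

-- ===== PRECONDITION & SPEC =====
-- Pre_ excludes only win < 0, where A always raises IndexError (the slide loop runs past the
-- end of the string, or wraps a negative index out of range).
def Pre_rolling_counts (seq : String) (win : Int) : Prop := 0 ≤ win
instance (seq : String) (win : Int) : Decidable (Pre_rolling_counts seq win) := by unfold Pre_rolling_counts; infer_instance
def pvWitness_rolling_counts : String × Int := ("GATTACA", 3)
def Spec_rolling_counts (seq : String) (win : Int) (out : List Int × List Int × List Int × List Int) : Prop := out = rolling_counts_alt seq win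
instance (seq : String) (win : Int) (out : List Int × List Int × List Int × List Int) : Decidable (Spec_rolling_counts seq win out) := by unfold Spec_rolling_counts; infer_instance

-- ===== CLAIM (what is proved, stated in full; the proofs are below) =====
def Claim_equal_rolling_counts : Prop := ∀ (seq : String) (win : Int), Dom_rolling_counts seq win → Pre_rolling_counts seq win → Spec_rolling_counts seq win (rolling_counts seq win)

-- ===== LEMMAS AND PROOFS =====

-- the four character classes counted by both programs
def pvPA (x : Char) : Bool := x == 'A'
def pvPC (x : Char) : Bool := x == 'C'
def pvPG (x : Char) : Bool := x == 'G'
def pvPT (x : Char) : Bool := x == 'T' || x == 'U'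

-- prefix count: number of p-characters in l[:k]
def pvF (p : Char → Bool) (l : List Char) (k : Nat) : Int := ((l.take k).countP p : Int)

-- window count: number of p-characters in l[i:i+w]
def pvV (p : Char → Bool) (l : List Char) (w : Nat) (i : Nat) : Int := pvF p l (i + w) - pvF p l i

-- the state B's loop has after consuming l[:k]
def pvS (l : List Char) (k : Nat) : (Int × Int × Int × Int) × (List Int × List Int × List Int × List Int) :=
  ((pvF pvPA l k, pvF pvPC l k, pvF pvPG l k, pvF pvPT l k),
   ((List.range (k+1)).map (pvF pvPA l), (List.range (k+1)).map (pvF pvPC l),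
    (List.range (k+1)).map (pvF pvPG l), (List.range (k+1)).map (pvF pvPT l)))

lemma pvF_succ (p : Char → Bool) (l : List Char) (k : Nat) (hk : k < l.length) :
    pvF p l (k + 1) = pvF p l k + (if p l[k] then 1 else 0) := by
  unfold pvF
  rw [List.take_add_one, List.getElem?_eq_getElem hk, Option.toList_some, List.countP_append]
  split <;> simp_all

lemma pvV_zero (p : Char → Bool) (l : List Char) (w : Nat) : pvV p l w 0 = pvF p l w := by
  simp [pvV, pvF]

-- T-count plus U-count is the count of the T-or-U class
lemma pvCntTU (l : List Char) : pvCnt 'T' l + pvCnt 'U' l = (l.countP pvPT : Int) := by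
  induction l with
  | nil => simp [pvCnt]
  | cons x xs ih =>
      simp only [pvCnt, List.countP_cons, pvPT] at *
      by_cases hT : x = 'T' <;> by_cases hU : x = 'U' <;> simp_all <;> omega

-- B's loop body advances pvS by one character
lemma pvB_step (l : List Char) (k : Nat) (hk : k < l.length) :
    pvStepB (pvS l k) l[k] = pvS l (k + 1) := by
  simp only [pvStepB, pvS, pvF_succ _ l k hk, List.range_succ, List.map_append, List.map_cons, List.map_nil]
  simp [pvPA, pvPC, pvPG, pvPT]

lemma pvB_fold_aux (l : List Char) (k : Nat) (hk : k ≤ l.length) :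
    (l.drop k).foldl pvStepB (pvS l k) = pvS l l.length := by
  induction hn : l.length - k generalizing k with
  | zero =>
      have : k = l.length := by omega
      subst this; simp
  | succ m ih =>
      have hk' : k < l.length := by omega
      rw [List.drop_eq_getElem_cons hk', List.foldl_cons, pvB_step l k hk']
      exact ih (k+1) (by omega) (by omega)

-- invariant of B's prefix loop
lemma pvB_fold (l : List Char) :
    l.foldl pvStepB ((0, 0, 0, 0), ([0], [0], [0], [0])) = pvS l l.length := by
  have h0 : pvS l 0 = ((0, 0, 0, 0), ([0], [0], [0], [0])) := by simp [pvS, pvF]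
  rw [← h0]
  simpa using pvB_fold_aux l 0 (Nat.zero_le _)

-- the elif chain of A's loop, per component (subtracting form, for the outgoing character)
lemma pvChainSub (a c g t : Int) (x : Char) :
    (if x == 'A' then (a - 1, c, g, t)
     else if x == 'C' then (a, c - 1, g, t)
     else if x == 'G' then (a, c, g - 1, t)
     else if x == 'T' || x == 'U' then (a, c, g, t - 1)
     else (a, c, g, t))
    = (a - (if pvPA x then 1 else 0), c - (if pvPC x then 1 else 0),
       g - (if pvPG x then 1 else 0), t - (if pvPT x then 1 else 0)) := by
  simp only [pvPA, pvPC, pvPG, pvPT]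
  split_ifs <;> simp_all

-- the elif chain of A's loop, per component (adding form, for the incoming character)
lemma pvChainAdd (a c g t : Int) (x : Char) :
    (if x == 'A' then (a + 1, c, g, t)
     else if x == 'C' then (a, c + 1, g, t)
     else if x == 'G' then (a, c, g + 1, t)
     else if x == 'T' || x == 'U' then (a, c, g, t + 1)
     else (a, c, g, t))
    = (a + (if pvPA x then 1 else 0), c + (if pvPC x then 1 else 0),
       g + (if pvPG x then 1 else 0), t + (if pvPT x then 1 else 0)) := by
  simp only [pvPA, pvPC, pvPG, pvPT]
  split_ifs <;> simp_all

-- the slide identity: remove l[M], add l[M+w]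
lemma pvV_succ (p : Char → Bool) (l : List Char) (w M : Nat) (hMw : M + w < l.length) :
    pvV p l w (M + 1)
      = pvV p l w M - (if p l[M] then 1 else 0) + (if p l[M + w] then 1 else 0) := by
  have h1 := pvF_succ p l M (by omega)
  have h2 := pvF_succ p l (M + w) hMw
  simp only [pvV, show M + 1 + w = M + w + 1 by omega, h1, h2]
  ring

-- A's loop body advances the window counts by one
lemma pvStepA_eq (l : List Char) (w : Nat) (M : Nat) (hMw : M + w < l.length)
    (st : (Int × Int × Int × Int) × (List Int × List Int × List Int × List Int))
    (h : st.1 = (pvV pvPA l w M, pvV pvPC l w M, pvV pvPG l w M, pvV pvPT l w M)) :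
    pvStepA l (w : Int) st ((M : Int) + 1)
    = ((pvV pvPA l w (M+1), pvV pvPC l w (M+1), pvV pvPG l w (M+1), pvV pvPT l w (M+1)),
       (st.2.1 ++ [pvV pvPA l w (M+1)], st.2.2.1 ++ [pvV pvPC l w (M+1)],
        st.2.2.2.1 ++ [pvV pvPG l w (M+1)], st.2.2.2.2 ++ [pvV pvPT l w (M+1)])) := by
  have hM : M < l.length := by omega
  have hout : PySem.List.pyGetD l ((M : Int) + 1 - 1) ' ' = l[M] := by
    rw [show ((M : Int) + 1 - 1) = ((M : Nat) : Int) by ring, PySem.List.pyGetD_natCast,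
        List.getD_eq_getElem _ _ hM]
  have hinn : PySem.List.pyGetD l ((M : Int) + 1 + (w : Int) - 1) ' ' = l[M + w] := by
    rw [show ((M : Int) + 1 + (w : Int) - 1) = ((M + w : Nat) : Int) by push_cast; ring,
        PySem.List.pyGetD_natCast, List.getD_eq_getElem _ _ hMw]
  simp only [pvStepA, hout, hinn, h, pvChainSub, pvChainAdd, pvV_succ _ l w M hMw]

-- invariant of A's slide loop: after the first M iterations the state holds window M's counts
lemma pvA_fold (l : List Char) (w : Nat) (M : Nat) (hM : M + w ≤ l.length) :
    (PySem.List.pyRange 1 ((M : Int) + 1)).foldl (pvStepA l (w : Int))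
      ((pvV pvPA l w 0, pvV pvPC l w 0, pvV pvPG l w 0, pvV pvPT l w 0),
       ([pvV pvPA l w 0], [pvV pvPC l w 0], [pvV pvPG l w 0], [pvV pvPT l w 0]))
    = ((pvV pvPA l w M, pvV pvPC l w M, pvV pvPG l w M, pvV pvPT l w M),
       ((List.range (M + 1)).map (pvV pvPA l w), (List.range (M + 1)).map (pvV pvPC l w),
        (List.range (M + 1)).map (pvV pvPG l w), (List.range (M + 1)).map (pvV pvPT l w))) := by
  induction M with
  | zero =>
      rw [show ((0 : Nat) : Int) + 1 = 1 by ring, PySem.List.pyRange_one_eq_nil (by omega)]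
      simp
  | succ M ih =>
      have hstep := pvStepA_eq l w M (by omega)
      rw [show (((M + 1 : Nat)) : Int) + 1 = ((M : Int) + 1) + 1 by push_cast; ring,
          PySem.List.pyRange_one_succ_right (by omega), List.foldl_append, ih (by omega),
          List.foldl_cons, List.foldl_nil, hstep _ rfl]
      simp [List.range_succ]

-- the main equivalence on 0 ≤ win
theorem pv_main (seq : String) (win : Int) (hpre : 0 ≤ win) :
    rolling_counts seq win = rolling_counts_alt seq win := by
  unfold rolling_counts rolling_counts_alt
  by_cases hlt : PySem.Str.len seq < win
  · simp only [hlt, if_pos]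
  · simp only [hlt, if_neg, not_false_iff]
    set l := seq.toList with hl
    have hlen : PySem.Str.len seq = (l.length : Int) := PySem.Str.len_eq seq
    obtain ⟨w, hwcast⟩ : ∃ w : Nat, win = (w : Int) := ⟨win.toNat, by omega⟩
    have hwle : w ≤ l.length := by omega
    -- A side
    have hslice : PySem.List.slice l none (some win) = l.take w := by
      rw [PySem.List.slice_to l hpre, hwcast]; simp
    have hA : (PySem.List.pyRange 1 (PySem.Str.len seq - win + 1)).foldl (pvStepA l win)
        ((pvCnt 'A' (l.take w), pvCnt 'C' (l.take w), pvCnt 'G' (l.take w),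
          pvCnt 'T' (l.take w) + pvCnt 'U' (l.take w)),
         ([pvCnt 'A' (l.take w)], [pvCnt 'C' (l.take w)], [pvCnt 'G' (l.take w)],
          [pvCnt 'T' (l.take w) + pvCnt 'U' (l.take w)]))
        = ((pvV pvPA l w (l.length - w), pvV pvPC l w (l.length - w), pvV pvPG l w (l.length - w), pvV pvPT l w (l.length - w)),
           ((List.range (l.length - w + 1)).map (pvV pvPA l w), (List.range (l.length - w + 1)).map (pvV pvPC l w),
            (List.range (l.length - w + 1)).map (pvV pvPG l w), (List.range (l.length - w + 1)).map (pvV pvPT l w))) := by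
      have h1 : PySem.Str.len seq - win + 1 = ((l.length - w : Nat) : Int) + 1 := by
        rw [hlen, hwcast]; push_cast [Nat.cast_sub hwle]; ring
      have h2 : pvCnt 'A' (l.take w) = pvV pvPA l w 0 := by rw [pvV_zero]; rfl
      have h3 : pvCnt 'C' (l.take w) = pvV pvPC l w 0 := by rw [pvV_zero]; rfl
      have h4 : pvCnt 'G' (l.take w) = pvV pvPG l w 0 := by rw [pvV_zero]; rfl
      have h5 : pvCnt 'T' (l.take w) + pvCnt 'U' (l.take w) = pvV pvPT l w 0 := by
        rw [pvV_zero, pvCntTU]; rfl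
      rw [h1, h2, h3, h4, h5, hwcast, pvA_fold l w (l.length - w) (by omega)]
    rw [hslice, hA, pvB_fold l]
    -- B side
    have hidx : PySem.List.pyRange 0 (PySem.Str.len seq - win + 1)
        = (List.range (l.length - w + 1)).map (fun k : Nat => (k : Int)) := by
      rw [hlen, hwcast, show (l.length : Int) - (w : Int) + 1 = ((l.length - w + 1 : Nat) : Int) by
            push_cast [Nat.cast_sub hwle]; ring,
          PySem.List.pyRange_zero_nat]
    have hmap : ∀ (p : Char → Bool),
        ((List.range (l.length - w + 1)).map (fun k : Nat => (k : Int))).map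
          (fun i => PySem.List.pyGetD ((List.range (l.length + 1)).map (pvF p l)) (i + win) 0
                  - PySem.List.pyGetD ((List.range (l.length + 1)).map (pvF p l)) i 0)
        = (List.range (l.length - w + 1)).map (pvV p l w) := by
      intro p
      rw [List.map_map]
      apply List.map_congr_left
      intro k hk
      rw [List.mem_range] at hk
      simp only [Function.comp]
      rw [show (k : Int) + win = ((k + w : Nat) : Int) by rw [hwcast]; push_cast; ring,
          PySem.List.pyGetD_natCast, PySem.List.pyGetD_natCast,
          PySem.List.getD_map_range _ _ _ _ (by omega),
          PySem.List.getD_map_range _ _ _ _ (by omega)]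
      simp [pvV]
    simp only [pvS, hidx, hmap]

-- ===== VERDICT (by name: the statement is the Claim_ definition above) =====
theorem rolling_counts_spec : Claim_equal_rolling_counts := by
  intro seq win _ hpre
  exact pv_main seq win hpre
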